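-- pv_equiv track=rewrite | github.com/smt2466/codewars | python2/kyu_6/frog_jumping.py | solution
-- ===== SOURCE A (Python) =====
-- def solution(array):
--     """Finds number of frog jumps to leave the array
--
--     Args:
--         array (list): List of ints
--
--     Returns:
--         int: Number of jumps or -1 if impossible
--
--     Examples:
--         >>> solution([-3, 1, 2])
--         1
--         >>> solution([1, 2, 3])
--         2
--         >>> solution([2, 0, -2])
--         -1
--     """
--     index, jumps = 0, 0
--     seen = []
--     while index not in seen:
--         seen.append(index)
--         try:
--             index += array[index]
--         except IndexError:
--             return jumps
--         jumps += 1
--         if index < 0: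
--             return jumps
--     return -1
-- ===== SOURCE B (Python) =====
-- def solution(array):
--     n = len(array)
--     path = [0]
--     while len(path) <= n + 1:
--         i = path[-1]
--         if i < 0 or i >= n:
--             return len(path) - 1
--         path.append(i + array[i])
--     return -1
-- ===== Notes on version B (the rewrite author's own statement) =====
-- stated objective: simpler
-- what changed: Instead of A's counters plus a seen list with a membership-based cycle test, B grows the trajectory list itself until it leaves the array (both exits unified as len(path)-1) or exceeds the pigeonhole bound len+1, then returns -1; no try/except and no jump counter.
import Mathlib
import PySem

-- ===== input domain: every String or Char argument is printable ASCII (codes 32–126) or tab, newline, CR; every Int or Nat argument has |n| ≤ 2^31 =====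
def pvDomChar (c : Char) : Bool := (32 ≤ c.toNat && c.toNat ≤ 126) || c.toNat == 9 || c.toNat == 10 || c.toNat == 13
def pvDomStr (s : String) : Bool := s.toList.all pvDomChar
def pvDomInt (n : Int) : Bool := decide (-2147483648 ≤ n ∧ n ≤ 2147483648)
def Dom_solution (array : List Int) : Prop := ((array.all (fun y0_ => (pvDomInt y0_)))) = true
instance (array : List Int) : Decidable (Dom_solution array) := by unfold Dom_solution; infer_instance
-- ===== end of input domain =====

-- B drops A's seen-membership cycle test and jump counter: it grows the trajectory list
-- until it leaves the array (answer = list length - 1) or exceeds the pigeonhole bound.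

-- ===== PORT A =====
-- A's while loop carrying (index, jumps, seen); fuel len+1 suffices — the loop exits or
-- revisits an index within len+1 iterations (seen holds distinct in-range indices), so the
-- fuel-exhaustion default -1 coincides with the `index ∈ seen` cycle return.
def solutionLoop (array : List Int) : Nat → Int → Int → List Int → Int
  | 0, _, _, _ => -1
  | fuel + 1, index, jumps, seen =>
    if index ∈ seen then -1
    else
      let seen' := seen ++ [index]
      match PySem.List.pyGet? array index with
      | none => jumps                      -- except IndexError: return jumps
      | some v =>
        let index' := index + v
        let jumps' := jumps + 1
        if index' < 0 then jumps'
        else solutionLoop array fuel index' jumps' seen'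

def solution (array : List Int) : Int :=
  solutionLoop array (array.length + 1) 0 0 []

-- ===== PORT B =====
-- B's `while len(path) <= n + 1` loop: fuel counts the remaining permitted iterations,
-- i.e. fuel = n + 2 - len(path); fuel 0 is the loop running out (return -1).
def solutionAltGo (array : List Int) : Nat → List Int → Int
  | 0, _ => -1
  | fuel + 1, path =>
    let i := path.getLastD 0                                   -- i = path[-1] (path never empty)
    if i < 0 ∨ (array.length : Int) ≤ i then (path.length : Int) - 1
    else
      -- array[i] is in range here, so the default of pyGetD is never used
      solutionAltGo array fuel (path ++ [i + PySem.List.pyGetD array i 0])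

def solution_alt (array : List Int) : Int :=
  solutionAltGo array (array.length + 1) [0]

-- ===== PRECONDITION & SPEC =====
def Spec_solution (array : List Int) (out : Int) : Prop := out = solution_alt array
instance (array : List Int) (out : Int) : Decidable (Spec_solution array out) := by unfold Spec_solution; infer_instance

-- ===== CLAIM (what is proved, stated in full; the proofs are below) =====
def Claim_equal_solution : Prop := ∀ (array : List Int), Dom_solution array → Spec_solution array (solution array)

-- ===== LEMMAS AND PROOFS =====

-- the deterministic step both programs take from an in-range index
def pvStep (array : List Int) (i : Int) : Int := i + PySem.List.pyGetD array i 0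

-- If the current index lies in a set S of in-range indices closed under the step,
-- B's loop never exits and returns -1 whatever the fuel.
lemma altGo_trapped (array : List Int) (S : List Int)
    (hb : ∀ x ∈ S, 0 ≤ x ∧ x < (array.length : Int))
    (hc : ∀ x ∈ S, pvStep array x ∈ S) :
    ∀ fuel path i, i ∈ S → solutionAltGo array fuel (path ++ [i]) = -1 := by
  intro fuel
  induction fuel with
  | zero => intro path i _; rfl
  | succ f ih =>
    intro path i hi
    obtain ⟨h0, h1⟩ := hb i hi
    have hcond : ¬ (i < 0 ∨ (array.length : Int) ≤ i) := by omega
    simp only [solutionAltGo, List.getLastD_concat]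
    rw [if_neg hcond]
    exact ih (path ++ [i]) _ (hc i hi)

-- a Nodup list of integers all in [0, n) has length ≤ n
lemma nodup_range_length_le (n : Nat) (l : List Int) (hnd : l.Nodup)
    (hb : ∀ x ∈ l, 0 ≤ x ∧ x < (n : Int)) : l.length ≤ n := by
  classical
  have hsub : l.toFinset ⊆ Finset.Ico (0 : Int) (n : Int) := by
    intro x hx
    have := hb x (List.mem_toFinset.mp hx)
    simp [Finset.mem_Ico, this.1, this.2]
  have hcard := Finset.card_le_card hsub
  rw [List.toFinset_card_of_nodup hnd] at hcard
  simpa using hcard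

lemma loop_eq (array : List Int) :
    ∀ (fuel : Nat) (i jumps : Int) (seen : List Int),
      0 ≤ i →
      seen.Nodup →
      (∀ x ∈ seen, 0 ≤ x ∧ x < (array.length : Int)) →
      (∀ x ∈ seen, pvStep array x ∈ seen ++ [i]) →
      jumps = (seen.length : Int) →
      fuel + seen.length = array.length + 1 →
      solutionLoop array fuel i jumps seen = solutionAltGo array fuel (seen ++ [i]) := by
  intro fuel
  induction fuel with
  | zero =>
    intro i jumps seen _ hnd hb _ _ hfuel
    -- impossible: seen would hold length + 1 distinct in-range indices
    have := nodup_range_length_le array.length seen hnd hb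
    omega
  | succ f ih =>
    intro i jumps seen h0 hnd hb hc hj hfuel
    simp only [solutionLoop]
    by_cases hmem : i ∈ seen
    · -- A detects the cycle; B stays trapped in `seen` forever
      rw [if_pos hmem]
      have hc' : ∀ x ∈ seen, pvStep array x ∈ seen := by
        intro x hx
        have := hc x hx
        simp only [List.mem_append, List.mem_singleton] at this
        rcases this with h | h
        · exact h
        · exact h ▸ hmem
      exact (altGo_trapped array seen hb hc' (f + 1) seen i hmem).symm
    · rw [if_neg hmem]
      rcases hg : PySem.List.pyGet? array i with _ | v
      · -- IndexError in A: i ≥ len, so B takes its bounds exit, returning len(path)-1 = jumps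
        have : ¬ PySem.Raise.InRange array.length i :=
          (PySem.List.pyGet?_eq_none_iff array i).mp hg
        simp only [PySem.Raise.InRange] at this
        have hge : i < 0 ∨ (array.length : Int) ≤ i := by omega
        simp only [solutionAltGo, List.getLastD_concat]
        rw [if_pos hge]
        simp [hj]
      · -- in-range step: both move to i + v
        have hrange : PySem.Raise.InRange array.length i := by
          by_contra hnr
          rw [(PySem.List.pyGet?_eq_none_iff array i).mpr hnr] at hg
          simp at hg
        simp only [PySem.Raise.InRange] at hrange
        have hd : PySem.List.pyGetD array i 0 = v := by
          simp [PySem.List.pyGetD, hg]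
        have hcond : ¬ (i < 0 ∨ (array.length : Int) ≤ i) := by omega
        have hnd' : (seen ++ [i]).Nodup := by
          simp only [List.nodup_append, List.nodup_singleton, true_and]
          refine ⟨hnd, ?_⟩
          intro a ha b hb
          simp only [List.mem_singleton] at hb
          subst hb
          exact fun h => hmem (h ▸ ha)
        have hb' : ∀ x ∈ seen ++ [i], 0 ≤ x ∧ x < (array.length : Int) := by
          intro x hx
          simp only [List.mem_append, List.mem_singleton] at hx
          rcases hx with h | h
          · exact hb x h
          · subst h; exact ⟨h0, by omega⟩
        have hlen' : (seen ++ [i]).length ≤ array.length :=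
          nodup_range_length_le array.length _ hnd' hb'
        simp only [List.length_append, List.length_singleton] at hlen'
        simp only [solutionAltGo, List.getLastD_concat]
        rw [if_neg hcond]
        simp only [hd]
        by_cases hneg : i + v < 0
        · -- A returns jumps+1 now; B exits on the next iteration with len(path')-1 = jumps+1
          rw [if_pos hneg]
          -- f ≥ 1, so B performs that next iteration
          obtain ⟨g, rfl⟩ : ∃ g, f = g + 1 := ⟨f - 1, by omega⟩
          have hge' : i + v < 0 ∨ (array.length : Int) ≤ i + v := Or.inl hneg
          simp only [solutionAltGo, List.getLastD_concat]
          rw [if_pos hge']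
          simp only [List.length_append, List.length_singleton]
          push_cast
          omega
        · rw [if_neg hneg]
          apply ih _ _ _ (by omega) hnd' hb'
          · intro x hx
            simp only [List.mem_append, List.mem_singleton] at hx ⊢
            rcases hx with h | h
            · have h2 := hc x h
              simp only [List.mem_append, List.mem_singleton] at h2
              rcases h2 with h' | h'
              · exact Or.inl (Or.inl h')
              · exact Or.inl (Or.inr h')
            · subst h
              right
              simp [pvStep, hd]
          · simp [hj]
          · simp only [List.length_append, List.length_singleton]
            omega

-- ===== VERDICT (by name: the statement is the Claim_ definition above) =====
theorem solution_spec : Claim_equal_solution := by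
  intro array _
  unfold Spec_solution solution solution_alt
  exact loop_eq array (array.length + 1) 0 0 [] le_rfl List.nodup_nil (by simp) (by simp) (by simp) (by simp)
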